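-- pv_equiv track=rewrite | github.com/WangSihan1118/Practice-Project | CITS1402 Python Project2(word frequency)/project2.py | conjunctions
-- ===== SOURCE A (Python) =====
-- def stripAllPunctuation(string):
--     punctuations = '\'\"#\$%&()*+,-./:;<=>?@[\\]^_`{|}~'
--     for punctuation in punctuations:
--         string = string.replace(punctuation,"")
--     return string
--
-- def conjunctions(txtfile):
--     txtfile = stripAllPunctuation(txtfile)
--     txtfile = txtfile.split()
--     conjunctions_txt = []
--     ''' remove punctuation(,)'''
--     for word in txtfile:
--         conjunctions_txt.append(word.strip(",\'\".-?!"))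
--
--     conjunctions_list = ["also", "although", "and", "as", "because", "before", "but", "for", "if", "nor", "of",
-- "or", "since", "that", "though", "until", "when", "whenever", "whereas",
-- "which", "while", "yet"]
--     conjunctions_dict = {}
--     for word in conjunctions_list:
--         conjunctions_dict[word] = 0
--     for word in conjunctions_txt:
--         if word in conjunctions_dict:
--             conjunctions_dict[word] = conjunctions_dict[word] + 1
--     return conjunctions_dict
-- ===== SOURCE B (Python) =====
-- def stripAllPunctuation(string):
--     punctuations = '\'\"#\$%&()*+,-./:;<=>?@[\\]^_`{|}~'
--     for punctuation in punctuations: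
--         string = string.replace(punctuation, "")
--     return string
--
-- def conjunctions(txtfile):
--     # sort the cleaned words once, then one merge-scan over the sorted words
--     # against the (alphabetically ordered) conjunction list: each target's
--     # occurrences form a contiguous run, so a single forward pointer suffices.
--     words = sorted(w.strip(",\'\".-?!") for w in stripAllPunctuation(txtfile).split())
--     targets = ["also", "although", "and", "as", "because", "before", "but", "for", "if", "nor", "of",
-- "or", "since", "that", "though", "until", "when", "whenever", "whereas",
-- "which", "while", "yet"]
--     result = {}
--     i, n = 0, len(words)
--     for t in targets:
--         while i < n and words[i] < t:
--             i += 1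
--         c = 0
--         while i < n and words[i] == t:
--             c += 1
--             i += 1
--         result[t] = c
--     return result
-- ===== Notes on version B (the rewrite author's own statement) =====
-- stated objective: alternative
-- what changed: Same two-phase cleaning, but counting is done by sorting the cleaned words once and then merge-scanning the sorted list against the alphabetically ordered conjunction list with a single forward pointer (each target's occurrences are a contiguous run), instead of A's zero-initialised dict tallied in one hashed pass over the words.
import Mathlib
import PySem

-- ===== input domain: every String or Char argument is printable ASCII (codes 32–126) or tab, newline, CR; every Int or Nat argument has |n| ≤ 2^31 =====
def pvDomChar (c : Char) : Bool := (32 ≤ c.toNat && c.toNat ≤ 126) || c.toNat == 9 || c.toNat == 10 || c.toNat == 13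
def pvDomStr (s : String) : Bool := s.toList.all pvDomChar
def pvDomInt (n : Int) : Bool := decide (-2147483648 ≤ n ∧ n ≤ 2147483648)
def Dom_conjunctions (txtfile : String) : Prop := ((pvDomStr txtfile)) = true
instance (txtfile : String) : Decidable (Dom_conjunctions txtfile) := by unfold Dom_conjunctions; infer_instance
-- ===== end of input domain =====

-- B keeps the cleaning phase but replaces A's dict tally with sort-then-merge-scan counting
-- ('alternative' objective: a different algorithm, not claimed faster).

-- ===== PORT A =====
-- shared module helper stripAllPunctuation (both Pythons contain it verbatim)
def stripAllPunctuation (s : String) : String :=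
  ("'\"#\\$%&()*+,-./:;<=>?@[\\]^_`{|}~".toList).foldl
    (fun acc c => PySem.Str.replace acc (String.ofList [c]) "") s

def conjunctionsList : List String :=
  ["also", "although", "and", "as", "because", "before", "but", "for", "if", "nor", "of",
   "or", "since", "that", "though", "until", "when", "whenever", "whereas",
   "which", "while", "yet"]

def conjunctions (txtfile : String) : List (String × Int) :=
  let stripped := stripAllPunctuation txtfile
  let words := PySem.Str.split₀ stripped
  -- for word in txtfile: conjunctions_txt.append(word.strip(",'\".-?!"))
  let conjunctionsTxt := words.foldl (fun acc w => acc ++ [PySem.Str.stripChars w ",'\".-?!"]) []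
  -- for word in conjunctions_list: conjunctions_dict[word] = 0
  let d0 := conjunctionsList.foldl (fun d w => d.insert w (0 : Int)) PySem.Dict.empty
  -- for word in conjunctions_txt: if word in dict: dict[word] += 1
  let d := conjunctionsTxt.foldl
    (fun d w => if d.contains w then d.insert w (d.getD w 0 + 1) else d) d0
  d.items

-- ===== PORT B =====
-- the two while loops of B, walking the sorted word list once per target:
-- 'while i < n and words[i] < t: i += 1' = dropWhile; the counting while = takeWhile/dropWhile
def mergeCount : List String → List String → List (String × Int)
  | [], _ => []
  | t :: ts, rem =>
    let rem1 := rem.dropWhile (fun w => decide (w < t))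
    let c := (rem1.takeWhile (fun w => w == t)).length
    (t, (c : Int)) :: mergeCount ts (rem1.dropWhile (fun w => w == t))

def conjunctions_alt (txtfile : String) : List (String × Int) :=
  let words := PySem.List.sorted
    ((PySem.Str.split₀ (stripAllPunctuation txtfile)).map
      (fun w => PySem.Str.stripChars w ",'\".-?!"))
    (fun w => w) false
  mergeCount conjunctionsList words

-- ===== PRECONDITION & SPEC =====
def Spec_conjunctions (txtfile : String) (out : List (String × Int)) : Prop := out = conjunctions_alt txtfile
instance (txtfile : String) (out : List (String × Int)) : Decidable (Spec_conjunctions txtfile out) := by unfold Spec_conjunctions; infer_instance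

-- ===== CLAIM (what is proved, stated in full; the proofs are below) =====
def Claim_equal_conjunctions : Prop := ∀ (txtfile : String), Dom_conjunctions txtfile → Spec_conjunctions txtfile (conjunctions txtfile)

-- ===== LEMMAS AND PROOFS =====

-- A's counting step
def countStep (d : PySem.Dict String Int) (w : String) : PySem.Dict String Int :=
  if d.contains w then d.insert w (d.getD w 0 + 1) else d

theorem keys_countStep (d : PySem.Dict String Int) (w : String) :
    (countStep d w).keys = d.keys := by
  unfold countStep
  split
  · exact PySem.Dict.keys_insert_of_contains d _ (by assumption)
  · rfl

theorem keys_foldl_countStep (ws : List String) (d : PySem.Dict String Int) :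
    (ws.foldl countStep d).keys = d.keys := by
  induction ws generalizing d with
  | nil => rfl
  | cons w ws ih => rw [List.foldl_cons, ih, keys_countStep]

theorem contains_countStep (d : PySem.Dict String Int) (w v : String)
    (hv : d.contains v = true) : (countStep d w).contains v = true := by
  unfold countStep
  split
  · rw [PySem.Dict.contains_insert]; simp [hv]
  · exact hv

theorem getD_foldl_countStep (ws : List String) (d : PySem.Dict String Int) (v : String)
    (hv : d.contains v = true) :
    (ws.foldl countStep d).getD v 0 = d.getD v 0 + ws.count v := by
  induction ws generalizing d with
  | nil => simp
  | cons w ws ih =>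
    rw [List.foldl_cons, ih _ (contains_countStep d w v hv)]
    by_cases hwv : w = v
    · subst hwv
      have hstep : countStep d w = d.insert w (d.getD w 0 + 1) := by
        unfold countStep; rw [hv]; rfl
      rw [hstep, PySem.Dict.getD_insert_self]
      simp
      omega
    · have hstep : (countStep d w).getD v 0 = d.getD v 0 := by
        unfold countStep
        split
        · exact PySem.Dict.getD_insert_of_ne d _ _ (fun h => hwv h.symm)
        · rfl
      rw [hstep]
      simp [hwv]

theorem items_d0 :
    (conjunctionsList.foldl (fun d w => d.insert w (0 : Int)) PySem.Dict.empty).items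
      = conjunctionsList.map (fun w => (w, (0 : Int))) := by
  have h := PySem.Dict.items_foldl_insert_fresh (l := conjunctionsList)
    (k := fun w => w) (v := fun _ => (0 : Int)) (d := PySem.Dict.empty)
    (by intro a _; exact PySem.Dict.contains_empty a) (by decide)
  simpa using h

theorem keys_d0 :
    (conjunctionsList.foldl (fun d w => d.insert w (0 : Int)) PySem.Dict.empty).keys
      = conjunctionsList := by
  show ((conjunctionsList.foldl (fun d w => d.insert w (0 : Int)) PySem.Dict.empty).items.map (·.1))
      = conjunctionsList
  rw [items_d0, List.map_map]
  simp [Function.comp_def]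

theorem nodup_conjunctionsList : conjunctionsList.Nodup := by decide

-- A computes the per-conjunction counts of the cleaned word list
theorem conjunctions_eq_counts (ws : List String) :
    ((ws.foldl (fun acc w => acc ++ [PySem.Str.stripChars w ",'\".-?!"]) []).foldl
        (fun d w => if d.contains w then d.insert w (d.getD w 0 + 1) else d)
        (conjunctionsList.foldl (fun d w => d.insert w (0 : Int)) PySem.Dict.empty)).items
      = conjunctionsList.map
          (fun k => (k, ((ws.map (fun w => PySem.Str.stripChars w ",'\".-?!")).count k : Int))) := by
  simp only [PySem.List.foldl_append_singleton_eq_map, List.nil_append]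
  generalize (ws.map (fun w => PySem.Str.stripChars w ",'\".-?!")) = words
  generalize hd0 : conjunctionsList.foldl (fun d w => d.insert w (0 : Int)) PySem.Dict.empty = d0
  have hfold : (words.foldl (fun d w => if d.contains w then d.insert w (d.getD w 0 + 1) else d) d0)
      = words.foldl countStep d0 := rfl
  rw [hfold]
  have hkd0 : d0.keys = conjunctionsList := by rw [← hd0]; exact keys_d0
  have hkeys : (words.foldl countStep d0).keys = conjunctionsList := by
    rw [keys_foldl_countStep, hkd0]
  have hnd : (words.foldl countStep d0).keys.Nodup := by
    rw [hkeys]; exact nodup_conjunctionsList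
  rw [PySem.Dict.items_eq_map_keys _ hnd (0 : Int), hkeys]
  apply List.map_congr_left
  intro k hk
  have hmem : (k, (0 : Int)) ∈ d0.items := by
    rw [← hd0, items_d0]; exact List.mem_map_of_mem hk
  have hnd0 : d0.keys.Nodup := by rw [hkd0]; exact nodup_conjunctionsList
  have hc : d0.contains k = true := by
    rw [PySem.Dict.contains_iff_mem_keys, hkd0]; exact hk
  have hg0 : d0.getD k 0 = 0 := PySem.Dict.getD_of_mem_items d0 hmem hnd0 0
  rw [getD_foldl_countStep words d0 k hc, hg0]
  simp

-- B-side: the merge scan over a sorted list computes counts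
theorem dropWhile_lt_ge (t : String) (xs : List String)
    (hs : xs.Pairwise (· ≤ ·)) :
    ∀ x ∈ xs.dropWhile (fun w => decide (w < t)), t ≤ x := by
  induction xs with
  | nil => intro x hx; simp at hx
  | cons a l ih =>
    rcases List.pairwise_cons.mp hs with ⟨ha, hl⟩
    by_cases h : a < t
    · rw [List.dropWhile_cons, decide_eq_true h, if_pos rfl]
      exact ih hl
    · intro x hx
      rw [List.dropWhile_cons, decide_eq_false h, if_neg (by simp)] at hx
      rcases List.mem_cons.mp hx with rfl | hx
      · exact le_of_not_gt h
      · exact le_trans (le_of_not_gt h) (ha x hx)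

theorem takeWhile_eq_length_count (t : String) (xs : List String)
    (hs : xs.Pairwise (· ≤ ·)) (hge : ∀ x ∈ xs, t ≤ x) :
    (xs.takeWhile (fun w => w == t)).length = xs.count t := by
  induction xs with
  | nil => rfl
  | cons a l ih =>
    rcases List.pairwise_cons.mp hs with ⟨ha, hl⟩
    by_cases h : a = t
    · subst h
      have hge' : ∀ x ∈ l, a ≤ x := ha
      simp [ih hl hge']
    · have hta : t < a := lt_of_le_of_ne (hge a (List.mem_cons_self)) (fun e => h e.symm)
      have hzero : l.count t = 0 := by
        rw [List.count_eq_zero]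
        intro hmem
        exact absurd (ha t hmem) (not_le.mpr hta)
      simp [h, hzero]

theorem count_drops_eq (t t' : String) (xs : List String) (htt : t < t') :
    (((xs.dropWhile (fun w => decide (w < t))).dropWhile (fun w => w == t)).count t')
      = xs.count t' := by
  have h1 : xs = xs.takeWhile (fun w => decide (w < t)) ++ xs.dropWhile (fun w => decide (w < t)) :=
    (List.takeWhile_append_dropWhile).symm
  set ys := xs.dropWhile (fun w => decide (w < t)) with hys
  have h2 : ys = ys.takeWhile (fun w => w == t) ++ ys.dropWhile (fun w => w == t) :=
    (List.takeWhile_append_dropWhile).symm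
  have c1 : (xs.takeWhile (fun w => decide (w < t))).count t' = 0 := by
    rw [List.count_eq_zero]
    intro hmem
    have := List.mem_takeWhile_imp hmem
    simp only [decide_eq_true_eq] at this
    exact absurd htt (not_lt.mpr (le_of_lt this))
  have c2 : (ys.takeWhile (fun w => w == t)).count t' = 0 := by
    rw [List.count_eq_zero]
    intro hmem
    have := List.mem_takeWhile_imp hmem
    have heq : t' = t := by simpa using this
    exact absurd htt (by rw [heq]; exact lt_irrefl t)
  conv_rhs => rw [h1]
  rw [List.count_append, c1]
  conv_rhs => rw [h2]
  rw [List.count_append, c2]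
  omega

theorem mergeCount_eq (ts : List String) (rem : List String)
    (hts : ts.Pairwise (· < ·)) (hrem : rem.Pairwise (· ≤ ·)) :
    mergeCount ts rem = ts.map (fun t => (t, (rem.count t : Int))) := by
  induction ts generalizing rem with
  | nil => rfl
  | cons t ts ih =>
    rcases List.pairwise_cons.mp hts with ⟨hta, htl⟩
    have hge := dropWhile_lt_ge t rem hrem
    have hrem1 : (rem.dropWhile (fun w => decide (w < t))).Pairwise (· ≤ ·) :=
      hrem.sublist (List.dropWhile_sublist _)
    have hrem2 : ((rem.dropWhile (fun w => decide (w < t))).dropWhile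
        (fun w => w == t)).Pairwise (· ≤ ·) :=
      hrem1.sublist (List.dropWhile_sublist _)
    have hcnt : ((rem.dropWhile (fun w => decide (w < t))).takeWhile
        (fun w => w == t)).length = rem.count t := by
      rw [takeWhile_eq_length_count t _ hrem1 hge]
      have h1 : rem = rem.takeWhile (fun w => decide (w < t))
          ++ rem.dropWhile (fun w => decide (w < t)) :=
        (List.takeWhile_append_dropWhile).symm
      have c1 : (rem.takeWhile (fun w => decide (w < t))).count t = 0 := by
        rw [List.count_eq_zero]
        intro hmem
        have := List.mem_takeWhile_imp hmem
        simp only [decide_eq_true_eq] at this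
        exact lt_irrefl t this
      conv_rhs => rw [h1]
      rw [List.count_append, c1]
      omega
    unfold mergeCount
    simp only []
    rw [hcnt, ih _ htl hrem2]
    congr 1
    apply List.map_congr_left
    intro t' ht'
    have := count_drops_eq t t' rem (hta t' ht')
    rw [this]

theorem pairwise_lt_conjunctionsList : conjunctionsList.Pairwise (· < ·) := by
  have h : conjunctionsList.Pairwise (fun a b => a.toList < b.toList) := by decide
  exact h.imp (fun hab => String.lt_iff_toList_lt.mpr hab)

theorem conjunctions_eq (txtfile : String) :
    conjunctions txtfile = conjunctions_alt txtfile := by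
  unfold conjunctions conjunctions_alt
  rw [conjunctions_eq_counts]
  have hp : (PySem.List.sorted
      ((PySem.Str.split₀ (stripAllPunctuation txtfile)).map
        (fun w => PySem.Str.stripChars w ",'\".-?!")) (fun w => w) false).Pairwise
      (· ≤ ·) := by
    simpa using PySem.List.sorted_pairwise
      ((PySem.Str.split₀ (stripAllPunctuation txtfile)).map
        (fun w => PySem.Str.stripChars w ",'\".-?!")) (fun w => w)
  rw [mergeCount_eq _ _ pairwise_lt_conjunctionsList hp]
  apply List.map_congr_left
  intro k _
  have hperm := PySem.List.sorted_perm
    ((PySem.Str.split₀ (stripAllPunctuation txtfile)).map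
      (fun w => PySem.Str.stripChars w ",'\".-?!")) (fun w => w) false
  rw [hperm.count_eq]

-- ===== VERDICT (by name: the statement is the Claim_ definition above) =====
theorem conjunctions_spec : Claim_equal_conjunctions := by
  intro txtfile _
  unfold Spec_conjunctions
  exact conjunctions_eq txtfile
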